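-- pv_equiv track=rewrite | github.com/jskim7018/leetcode_study | algorithm_study/2026/01/20260131/medium/LC_2964.py | divisibleTripletCount
-- ===== SOURCE A (Python) =====
-- from typing import List
-- from collections import defaultdict
--
-- def divisibleTripletCount(nums: List[int], d: int) -> int:
--     rem_cnt = defaultdict(int)
--     n = len(nums)
--
--     ans = 0
--     for i in range(n):
--         for j in range(i+1, n):
--             need = (d - ((nums[i]+nums[j]) % d)) % d
--             ans += rem_cnt[need]
--         rem_cnt[nums[i] % d] += 1
--     return ans
-- ===== SOURCE B (Python) =====
-- from typing import List
-- from collections import defaultdict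
--
-- def divisibleTripletCount(nums: List[int], d: int) -> int:
--     # one pass: one[r] = #elements seen with remainder r,
--     # two[r] = #pairs seen with pair-sum remainder r
--     ans = 0
--     one = defaultdict(int)
--     two = defaultdict(int)
--     for x in nums:
--         r = x % d
--         ans += two[(d - r) % d]
--         for s, c in one.items():
--             two[(s + r) % d] += c
--         one[r] += 1
--     return ans
-- ===== Notes on version B (the rewrite author's own statement) =====
-- stated objective: alternative
-- what changed: Replaces the O(n^2) scan over all (i,j) pairs with prefix-counter lookups by a single left-to-right pass maintaining two frequency tables (element remainders and pair-sum remainders), so each new element is matched against the pair-sum table and the inner work is over distinct remainder classes instead of all later indices.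
import Mathlib
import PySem

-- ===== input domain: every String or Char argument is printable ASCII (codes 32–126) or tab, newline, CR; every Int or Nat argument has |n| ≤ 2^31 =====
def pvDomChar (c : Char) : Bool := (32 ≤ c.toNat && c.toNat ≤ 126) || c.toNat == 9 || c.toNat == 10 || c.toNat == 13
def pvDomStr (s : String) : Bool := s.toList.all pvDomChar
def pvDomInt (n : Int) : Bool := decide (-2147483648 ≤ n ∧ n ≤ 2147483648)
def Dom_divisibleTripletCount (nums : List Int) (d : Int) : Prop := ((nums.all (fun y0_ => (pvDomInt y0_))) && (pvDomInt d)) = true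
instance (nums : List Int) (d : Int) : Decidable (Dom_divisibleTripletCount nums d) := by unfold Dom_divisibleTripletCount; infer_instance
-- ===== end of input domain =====

-- B replaces A's scan over all (i,j) pairs by a one-pass scheme keeping two remainder-frequency
-- tables (element remainders and pair-sum remainders); same return value, no side effects.

-- ===== PORT A =====
-- defaultdict reads `rem_cnt[need]` are ported as `getD … 0`: the zero entries the Python
-- read inserts never change any later `getD`-read value, so the port is value-exact.
def divisibleTripletCount (nums : List Int) (d : Int) : Int :=
  let n : Int := (nums.length : Int)
  ((PySem.List.pyRange 0 n 1).foldl
    (fun (st : PySem.Dict Int Int × Int) i =>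
      let ans := (PySem.List.pyRange (i + 1) n 1).foldl
        (fun acc j =>
          let need := PySem.Int.mod
            (d - PySem.Int.mod (PySem.List.pyGetD nums i 0 + PySem.List.pyGetD nums j 0) d) d
          acc + st.1.getD need 0) st.2
      (st.1.modify (PySem.Int.mod (PySem.List.pyGetD nums i 0) d) 0 (· + 1), ans))
    (PySem.Dict.empty, 0)).2

-- ===== PORT B =====
def divisibleTripletCount_alt (nums : List Int) (d : Int) : Int :=
  (nums.foldl
    (fun (st : Int × PySem.Dict Int Int × PySem.Dict Int Int) x =>
      let r := PySem.Int.mod x d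
      let ans := st.1 + st.2.2.getD (PySem.Int.mod (d - r) d) 0
      let two := st.2.1.items.foldl
        (fun tw sc => tw.modify (PySem.Int.mod (sc.1 + r) d) 0 (· + sc.2)) st.2.2
      let one := st.2.1.modify r 0 (· + 1)
      (ans, one, two))
    (0, PySem.Dict.empty, PySem.Dict.empty)).1

-- ===== PRECONDITION & SPEC =====
-- Pre_ excludes exactly the inputs where the Python A raises ZeroDivisionError: d = 0 with
-- a nonempty list (the first `% d` raises); both implementations raise there.
def Pre_divisibleTripletCount (nums : List Int) (d : Int) : Prop := d ≠ 0 ∨ nums = []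
instance (nums : List Int) (d : Int) : Decidable (Pre_divisibleTripletCount nums d) := by
  unfold Pre_divisibleTripletCount; infer_instance

def pvWitness_divisibleTripletCount : List Int × Int := ([3, 3, 4, 7, 8], 5)

def Spec_divisibleTripletCount (nums : List Int) (d : Int) (out : Int) : Prop := out = divisibleTripletCount_alt nums d
instance (nums : List Int) (d : Int) (out : Int) : Decidable (Spec_divisibleTripletCount nums d out) := by unfold Spec_divisibleTripletCount; infer_instance

-- ===== CLAIM (what is proved, stated in full; the proofs are below) =====
def Claim_equal_divisibleTripletCount : Prop := ∀ (nums : List Int) (d : Int), Dom_divisibleTripletCount nums d → Pre_divisibleTripletCount nums d → Spec_divisibleTripletCount nums d (divisibleTripletCount nums d)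

-- ===== LEMMAS AND PROOFS =====

-- number of pairs (z ∈ q, y ∈ ys) with d ∣ z + x + y (x the fixed middle element)
def pvC1 (d x : Int) (q ys : List Int) : Int :=
  (ys.map (fun y => (q.countP (fun z => decide (d ∣ (z + x + y))) : Int))).sum

-- number of triples (k < i < j) with i, j in s and k in q ++ (s before i), sum divisible by d
def pvW (d : Int) : List Int → List Int → Int
  | _, [] => 0
  | q, x :: xs => pvC1 d x q xs + pvW d (q ++ [x]) xs

-- number of pairs (z before y, both in p) with d ∣ z + y + x
def pvPC (d : Int) : List Int → Int → Int
  | [], _ => 0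
  | z :: zs, x => (zs.countP (fun y => decide (d ∣ (z + y + x))) : Int) + pvPC d zs x

-- remainders of all pair sums of p (earlier element first)
def pvPairSums (d : Int) : List Int → List Int
  | [] => []
  | z :: zs => zs.map (fun y => PySem.Int.mod (z + y) d) ++ pvPairSums d zs

theorem pv_dvd_sub_mod (a d : Int) : d ∣ (a - PySem.Int.mod a d) := by
  refine ⟨PySem.Int.floordiv a d, ?_⟩
  have h := PySem.Int.floordiv_mul_add_mod a d
  linarith

theorem pv_mod_eq_mod_iff (a b d : Int) (hd : d ≠ 0) :
    PySem.Int.mod a d = PySem.Int.mod b d ↔ d ∣ (a - b) := by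
  constructor
  · intro h
    have ha := pv_dvd_sub_mod a d
    have hb := pv_dvd_sub_mod b d
    have he : a - b = (a - PySem.Int.mod a d) - (b - PySem.Int.mod b d) := by rw [h]; ring
    rw [he]; exact dvd_sub ha hb
  · intro h
    have ha := pv_dvd_sub_mod a d
    have hb := pv_dvd_sub_mod b d
    have hdvd : d ∣ (PySem.Int.mod a d - PySem.Int.mod b d) := by
      have he : PySem.Int.mod a d - PySem.Int.mod b d
          = (b - PySem.Int.mod b d) - (a - PySem.Int.mod a d) + (a - b) := by ring
      rw [he]
      exact dvd_add (dvd_sub hb ha) h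
    have hz : PySem.Int.mod a d - PySem.Int.mod b d = 0 := by
      apply Int.eq_zero_of_dvd_of_natAbs_lt_natAbs hdvd
      rcases lt_or_gt_of_ne hd with hneg | hpos
      · have b1 := PySem.Int.mod_neg_bounds a hneg
        have b2 := PySem.Int.mod_neg_bounds b hneg
        omega
      · have b1 := PySem.Int.mod_nonneg a hpos
        have b2 := PySem.Int.mod_lt a hpos
        have b3 := PySem.Int.mod_nonneg b hpos
        have b4 := PySem.Int.mod_lt b hpos
        omega
    omega

theorem pv_key_eq (c d : Int) (hd : d ≠ 0) :
    PySem.Int.mod (d - PySem.Int.mod c d) d = PySem.Int.mod (-c) d := by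
  rw [pv_mod_eq_mod_iff _ _ _ hd]
  have h := pv_dvd_sub_mod c d
  have he : d - PySem.Int.mod c d - -c = d + (c - PySem.Int.mod c d) := by ring
  rw [he]
  exact dvd_add dvd_rfl h

theorem pv_mod_add_mod (a b d : Int) (hd : d ≠ 0) :
    PySem.Int.mod (PySem.Int.mod a d + PySem.Int.mod b d) d = PySem.Int.mod (a + b) d := by
  rw [pv_mod_eq_mod_iff _ _ _ hd]
  have ha := pv_dvd_sub_mod a d
  have hb := pv_dvd_sub_mod b d
  have he : PySem.Int.mod a d + PySem.Int.mod b d - (a + b)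
      = -((a - PySem.Int.mod a d) + (b - PySem.Int.mod b d)) := by ring
  rw [he]
  exact (dvd_add ha hb).neg_right

theorem pv_countP_dvd_congr (d : Int) (l : List Int) (f g : Int → Int) (h : ∀ y, f y = g y) :
    l.countP (fun y => decide (d ∣ f y)) = l.countP (fun y => decide (d ∣ g y)) :=
  List.countP_congr (fun a _ => by rw [h a])

theorem pv_beq_mod_eq_decide (d : Int) (hd : d ≠ 0) (a w : Int) :
    (PySem.Int.mod a d == PySem.Int.mod (d - PySem.Int.mod w d) d) = decide (d ∣ (a + w)) := by
  rw [pv_key_eq _ _ hd]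
  have h : (PySem.Int.mod a d = PySem.Int.mod (-w) d) ↔ d ∣ (a + w) := by
    rw [pv_mod_eq_mod_iff _ _ _ hd]
    constructor
    · intro hx; have he : a + w = a - -w := by ring
      rw [he]; exact hx
    · intro hx; have he : a - -w = a + w := by ring
      rw [he]; exact hx
  rw [Bool.beq_eq_decide_eq]
  exact decide_eq_decide.mpr h

theorem pv_count_mod_map (d : Int) (hd : d ≠ 0) (w : Int) (p : List Int) :
    (p.map (fun z => PySem.Int.mod z d)).count (PySem.Int.mod (d - PySem.Int.mod w d) d)
      = p.countP (fun z => decide (d ∣ (z + w))) := by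
  rw [List.count_eq_countP, List.countP_map]
  exact List.countP_congr (fun a _ => by
    simp only [Function.comp]
    rw [pv_beq_mod_eq_decide d hd a w])

theorem pv_getD_foldl_modify (f : Int → Int) :
    ∀ (l : List (Int × Int)) (tw : PySem.Dict Int Int) (t : Int),
    (l.foldl (fun tw sc => tw.modify (f sc.1) 0 (· + sc.2)) tw).getD t 0
      = tw.getD t 0 + ((l.filter (fun sc => f sc.1 == t)).map (·.2)).sum
  | [], tw, t => by simp
  | sc :: l, tw, t => by
    rw [List.foldl_cons, pv_getD_foldl_modify f l _ t, PySem.Dict.getD_modify]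
    by_cases hc : t = f sc.1
    · simp [hc]
      ring
    · have : (f sc.1 == t) = false := by simp [Ne.symm hc]
      simp [this, hc]

theorem pv_sum_count_keys (g : Int → Bool) (keys : List Int) (hnd : keys.Nodup) :
    ∀ (m : List Int), (∀ x ∈ m, x ∈ keys) →
    ((keys.filter g).map (fun k => (m.count k : Int))).sum = (m.countP g : Int)
  | [], _ => by simp
  | x :: m, hmem => by
    have ih := pv_sum_count_keys g keys hnd m (fun y hy => hmem y (List.mem_cons_of_mem _ hy))
    have hx : x ∈ keys := hmem x List.mem_cons_self
    have hcnt : ∀ k, ((x :: m).count k : Int) = (m.count k : Int) + (if x == k then 1 else 0) := by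
      intro k; rw [List.count_cons]; push_cast; split <;> simp
    calc ((keys.filter g).map (fun k => ((x :: m).count k : Int))).sum
        = ((keys.filter g).map (fun k => (m.count k : Int) + (if x == k then 1 else 0))).sum := by
          exact congrArg List.sum (List.map_congr_left (fun k _ => hcnt k))
      _ = ((keys.filter g).map (fun k => (m.count k : Int))).sum
            + ((keys.filter g).map (fun k => if x == k then 1 else 0)).sum := by
          exact PySem.List.sum_map_add_int _ _ _
      _ = (m.countP g : Int) + (if g x then 1 else 0) := by
          rw [ih]
          congr 1
          have h1 : ((keys.filter g).map (fun k => if x == k then (1:Int) else 0)).sum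
              = (((keys.filter g).countP (fun k => x == k)) : Int) := by
            exact PySem.List.sum_map_ite_one_zero _ _
          rw [h1]
          have h2 : (keys.filter g).countP (fun k => x == k) = (keys.filter g).count x := by
            rw [List.count_eq_countP]
            refine List.countP_congr (fun a _ => ?_)
            simp only [beq_iff_eq]
            exact eq_comm
          rw [h2]
          by_cases hg : g x
          · rw [List.count_filter hg, List.count_eq_one_of_mem hnd hx]; simp [hg]
          · have : (keys.filter g).count x = 0 := by
              rw [List.count_eq_zero]
              intro hmem2
              exact hg (List.of_mem_filter hmem2)
            rw [this]; simp [hg]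
      _ = ((x :: m).countP g : Int) := by
          rw [List.countP_cons]; push_cast; split <;> simp

theorem pv_pairSums_snoc (d x : Int) :
    ∀ (p : List Int) (t : Int),
    (pvPairSums d (p ++ [x])).count t
      = (pvPairSums d p).count t + (p.map (fun z => PySem.Int.mod (z + x) d)).count t
  | [], t => by simp [pvPairSums]
  | z :: zs, t => by
    have ih := pv_pairSums_snoc d x zs t
    simp only [List.cons_append, pvPairSums, List.count_append, List.map_append, List.map_cons,
      List.map_nil, List.count_cons, List.count_nil, ih]
    omega

theorem pv_count_pairSums (d : Int) (hd : d ≠ 0) (x : Int) :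
    ∀ (p : List Int),
    ((pvPairSums d p).count (PySem.Int.mod (d - PySem.Int.mod x d) d) : Int) = pvPC d p x
  | [] => by simp [pvPairSums, pvPC]
  | z :: zs => by
    have ih := pv_count_pairSums d hd x zs
    have h1 : (zs.map (fun y => PySem.Int.mod (z + y) d)).count
        (PySem.Int.mod (d - PySem.Int.mod x d) d)
        = zs.countP (fun y => decide (d ∣ (z + y + x))) := by
      rw [List.count_eq_countP, List.countP_map]
      exact List.countP_congr (fun a _ => by
        simp only [Function.comp]
        rw [pv_beq_mod_eq_decide d hd (z + a) x])
    simp only [pvPairSums, pvPC, List.count_append, h1]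
    push_cast
    omega

theorem pvC1_nil_left (d x : Int) (ys : List Int) : pvC1 d x [] ys = 0 := by
  simp [pvC1]

theorem pvC1_cons_ys (d x z : Int) (q zs : List Int) :
    pvC1 d x q (z :: zs)
      = (q.countP (fun k => decide (d ∣ (k + x + z))) : Int) + pvC1 d x q zs := by
  simp [pvC1]

theorem pvC1_snoc_ys (d x y : Int) (q ys : List Int) :
    pvC1 d x q (ys ++ [y])
      = pvC1 d x q ys + (q.countP (fun z => decide (d ∣ (z + x + y))) : Int) := by
  simp [pvC1]

theorem pvC1_snoc_q (d x z : Int) (q ys : List Int) :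
    pvC1 d x (q ++ [z]) ys
      = pvC1 d x q ys + (ys.countP (fun y => decide (d ∣ (z + x + y))) : Int) := by
  unfold pvC1
  have h : ∀ y : Int, (((q ++ [z]).countP (fun k => decide (d ∣ (k + x + y)))) : Int)
      = (q.countP (fun k => decide (d ∣ (k + x + y))) : Int)
        + (if decide (d ∣ (z + x + y)) then 1 else 0) := by
    intro y;
    rw [List.countP_append]
    push_cast [List.countP_cons]
    simp
  calc (ys.map (fun y => (((q ++ [z]).countP (fun k => decide (d ∣ (k + x + y)))) : Int))).sum
      = (ys.map (fun y => (q.countP (fun k => decide (d ∣ (k + x + y))) : Int)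
          + (if decide (d ∣ (z + x + y)) then 1 else 0))).sum := by
        exact congrArg List.sum (List.map_congr_left (fun y _ => h y))
    _ = (ys.map (fun y => (q.countP (fun k => decide (d ∣ (k + x + y))) : Int))).sum
          + (ys.map (fun y => if decide (d ∣ (z + x + y)) then (1:Int) else 0)).sum := by
        exact PySem.List.sum_map_add_int _ _ _
    _ = (ys.map (fun y => (q.countP (fun k => decide (d ∣ (k + x + y))) : Int))).sum
          + (ys.countP (fun y => decide (d ∣ (z + x + y))) : Int) := by
        rw [PySem.List.sum_map_ite_one_zero]

theorem pv_W_snoc (d x : Int) :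
    ∀ (p q : List Int), pvW d q (p ++ [x]) = pvW d q p + pvC1 d x q p + pvPC d p x
  | [], q => by simp [pvW, pvC1, pvPC]
  | z :: zs, q => by
    have ih := pv_W_snoc d x zs (q ++ [z])
    simp only [List.cons_append, pvW, pvPC, ih, pvC1_snoc_ys, pvC1_snoc_q, pvC1_cons_ys]
    have h1 : q.countP (fun k => decide (d ∣ (k + z + x))) = q.countP (fun k => decide (d ∣ (k + x + z))) :=
      pv_countP_dvd_congr d q _ _ (fun k => by ring)
    have h2 : zs.countP (fun y => decide (d ∣ (z + x + y))) = zs.countP (fun y => decide (d ∣ (z + y + x))) :=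
      pv_countP_dvd_congr d zs _ _ (fun y => by ring)
    rw [h1, h2]
    ring

theorem pv_A_loop (nums : List Int) (d : Int) (hd : d ≠ 0) :
    ∀ (s p : List Int) (ans : Int), p ++ s = nums →
    ((PySem.List.pyRange (p.length : Int) ((nums.length : Int)) 1).foldl
      (fun (st : PySem.Dict Int Int × Int) i =>
        (st.1.modify (PySem.Int.mod (PySem.List.pyGetD nums i 0) d) 0 (· + 1),
         (PySem.List.pyRange (i + 1) ((nums.length : Int)) 1).foldl
           (fun acc j => acc + st.1.getD (PySem.Int.mod (d - PySem.Int.mod (PySem.List.pyGetD nums i 0 + PySem.List.pyGetD nums j 0) d) d) 0) st.2))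
      (PySem.Dict.counter (p.map (fun z => PySem.Int.mod z d)), ans))
    = (PySem.Dict.counter (nums.map (fun z => PySem.Int.mod z d)), ans + pvW d p s) := by
  intro s
  induction s with
  | nil =>
    intro p ans h
    rw [List.append_nil] at h
    subst h
    rw [PySem.List.pyRange_one_eq_nil le_rfl, List.foldl_nil, pvW]
    simp
  | cons x xs ih =>
    intro p ans h
    have hlen : nums.length = p.length + (xs.length + 1) := by
      rw [← h]; simp
    have hlt : (p.length : Int) < (nums.length : Int) := by exact_mod_cast (by omega : p.length < nums.length)
    rw [PySem.List.pyRange_one_cons hlt, List.foldl_cons]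
    simp only []
    have hget : PySem.List.pyGetD nums ((p.length : Nat) : Int) 0 = x := by
      rw [PySem.List.pyGetD_natCast, ← h]
      simp [List.getD_eq_getElem?_getD]
    rw [hget]
    have hdrop : nums.drop (p.length + 1) = xs := by
      rw [← h, show p ++ x :: xs = (p ++ [x]) ++ xs by simp,
        show p.length + 1 = (p ++ [x]).length by simp, List.drop_left]
    have hinner :
        (PySem.List.pyRange ((p.length : Int) + 1) ((nums.length : Int)) 1).foldl
          (fun acc j => acc + (PySem.Dict.counter (p.map (fun z => PySem.Int.mod z d))).getD
            (PySem.Int.mod (d - PySem.Int.mod (x + PySem.List.pyGetD nums j 0) d) d) 0) ans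
        = ans + pvC1 d x p xs := by
      rw [PySem.List.foldl_pyRange_pyGetD' nums 0
        (fun acc y => acc + (PySem.Dict.counter (p.map (fun z => PySem.Int.mod z d))).getD
          (PySem.Int.mod (d - PySem.Int.mod (x + y) d) d) 0) ans (by positivity)]
      rw [show ((p.length : Int) + 1).toNat = p.length + 1 by omega, hdrop]
      rw [PySem.List.foldl_add]
      congr 1
      unfold pvC1
      congr 1
      refine List.map_congr_left (fun y _ => ?_)
      rw [PySem.Dict.getD_counter, pv_count_mod_map d hd (x + y) p]
      have hc := pv_countP_dvd_congr d p (fun z => z + (x + y)) (fun z => z + x + y) (fun z => by ring)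
      exact_mod_cast hc
    rw [hinner]
    rw [← PySem.Dict.counter_append_singleton,
      show (p.map (fun z => PySem.Int.mod z d)) ++ [PySem.Int.mod x d]
        = (p ++ [x]).map (fun z => PySem.Int.mod z d) by simp]
    have hlen2 : ((p ++ [x]).length : Int) = (p.length : Int) + 1 := by simp
    rw [← hlen2]
    rw [ih (p ++ [x]) (ans + pvC1 d x p xs) (by rw [List.append_assoc]; exact h)]
    rw [pvW]
    ring_nf

theorem pv_B_loop (d : Int) (hd : d ≠ 0) :
    ∀ (s p : List Int) (a : Int) (two : PySem.Dict Int Int),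
    (∀ t, two.getD t 0 = ((pvPairSums d p).count t : Int)) →
    ((s.foldl
      (fun (st : Int × PySem.Dict Int Int × PySem.Dict Int Int) x =>
        (st.1 + st.2.2.getD (PySem.Int.mod (d - PySem.Int.mod x d) d) 0,
         st.2.1.modify (PySem.Int.mod x d) 0 (· + 1),
         st.2.1.items.foldl (fun tw sc => tw.modify (PySem.Int.mod (sc.1 + PySem.Int.mod x d) d) 0 (· + sc.2)) st.2.2))
      (a, PySem.Dict.counter (p.map (fun z => PySem.Int.mod z d)), two)).1
      = a + pvW d [] (p ++ s) - pvW d [] p) := by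
  intro s
  induction s with
  | nil =>
    intro p a two htwo
    simp
  | cons x xs ih =>
    intro p a two htwo
    rw [List.foldl_cons]
    simp only []
    have ha : two.getD (PySem.Int.mod (d - PySem.Int.mod x d) d) 0 = pvPC d p x := by
      rw [htwo, pv_count_pairSums d hd x p]
    rw [ha]
    rw [← PySem.Dict.counter_append_singleton,
      show (p.map (fun z => PySem.Int.mod z d)) ++ [PySem.Int.mod x d]
        = (p ++ [x]).map (fun z => PySem.Int.mod z d) by simp]
    have htwo' : ∀ t,
        ((PySem.Dict.counter (p.map (fun z => PySem.Int.mod z d))).items.foldl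
          (fun tw sc => tw.modify (PySem.Int.mod (sc.1 + PySem.Int.mod x d) d) 0 (· + sc.2)) two).getD t 0
        = ((pvPairSums d (p ++ [x])).count t : Int) := by
      intro t
      rw [pv_getD_foldl_modify (fun k => PySem.Int.mod (k + PySem.Int.mod x d) d) _ two t]
      rw [PySem.Dict.items_counter, List.filter_map, List.map_map]
      have hsum := pv_sum_count_keys
        (fun k => PySem.Int.mod (k + PySem.Int.mod x d) d == t)
        (PySem.Set.ofList (p.map (fun z => PySem.Int.mod z d)))
        (PySem.Set.nodup_ofList _)
        (p.map (fun z => PySem.Int.mod z d))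
        (fun y hy => (PySem.Set.mem_ofList _ y).mpr hy)
      simp only [Function.comp_def] at hsum ⊢
      rw [hsum, htwo t]
      have hcp : (p.map (fun z => PySem.Int.mod z d)).countP
            (fun k => PySem.Int.mod (k + PySem.Int.mod x d) d == t)
          = (p.map (fun z => PySem.Int.mod (z + x) d)).count t := by
        rw [List.countP_map, List.count_eq_countP, List.countP_map]
        refine List.countP_congr (fun z _ => ?_)
        simp only [Function.comp]
        rw [pv_mod_add_mod z x d hd]
      rw [hcp, pv_pairSums_snoc d x p t]
      push_cast
      ring
    have hres := ih (p ++ [x]) (a + pvPC d p x)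
      ((PySem.Dict.counter (p.map (fun z => PySem.Int.mod z d))).items.foldl
        (fun tw sc => tw.modify (PySem.Int.mod (sc.1 + PySem.Int.mod x d) d) 0 (· + sc.2)) two)
      htwo'
    rw [hres]
    have hW := pv_W_snoc d x p []
    rw [pvC1_nil_left] at hW
    rw [List.append_assoc]
    simp only [List.cons_append, List.nil_append] at hW ⊢
    rw [hW]
    ring

theorem pv_A_main (nums : List Int) (d : Int) (hd : d ≠ 0) :
    divisibleTripletCount nums d = pvW d [] nums := by
  have h0 := pv_A_loop nums d hd nums [] 0 rfl
  simp only [List.length_nil, Nat.cast_zero, List.map_nil] at h0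
  rw [show PySem.Dict.counter ([] : List Int) = (PySem.Dict.empty : PySem.Dict Int Int) from rfl] at h0
  show ((PySem.List.pyRange 0 ((nums.length : Int)) 1).foldl
      (fun (st : PySem.Dict Int Int × Int) i =>
        (st.1.modify (PySem.Int.mod (PySem.List.pyGetD nums i 0) d) 0 (· + 1),
         (PySem.List.pyRange (i + 1) ((nums.length : Int)) 1).foldl
           (fun acc j => acc + st.1.getD (PySem.Int.mod (d - PySem.Int.mod (PySem.List.pyGetD nums i 0 + PySem.List.pyGetD nums j 0) d) d) 0) st.2))
      (PySem.Dict.empty, 0)).2 = pvW d [] nums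
  rw [h0]
  ring

theorem pv_B_main (nums : List Int) (d : Int) (hd : d ≠ 0) :
    divisibleTripletCount_alt nums d = pvW d [] nums := by
  have h0 := pv_B_loop d hd nums [] 0 PySem.Dict.empty
    (by intro t; simp [pvPairSums])
  simp only [List.map_nil, List.nil_append] at h0
  rw [show PySem.Dict.counter ([] : List Int) = (PySem.Dict.empty : PySem.Dict Int Int) from rfl] at h0
  show ((nums.foldl
      (fun (st : Int × PySem.Dict Int Int × PySem.Dict Int Int) x =>
        (st.1 + st.2.2.getD (PySem.Int.mod (d - PySem.Int.mod x d) d) 0,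
         st.2.1.modify (PySem.Int.mod x d) 0 (· + 1),
         st.2.1.items.foldl (fun tw sc => tw.modify (PySem.Int.mod (sc.1 + PySem.Int.mod x d) d) 0 (· + sc.2)) st.2.2))
      (0, PySem.Dict.empty, PySem.Dict.empty)).1) = pvW d [] nums
  rw [h0]
  simp [pvW]

theorem divisibleTripletCount_spec : Claim_equal_divisibleTripletCount := by
  intro nums d _ hpre
  unfold Spec_divisibleTripletCount
  rcases hpre with hd | hnil
  · rw [pv_A_main nums d hd, pv_B_main nums d hd]
  · subst hnil
    rfl
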